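-- pv_equiv track=rewrite | github.com/NSI-Termianle-2021-2022/NSI-Premiere | Theme D/DM_pyramide/GASNIER_Gabriel_Pyramide.py | get_width_last_mini_floor
-- ===== SOURCE A (Python) =====
-- def get_new_augmentation_var_values(width_augmentation_avancement : int, width_augmentation_moment : int, width_augmentation : int) -> tuple: #calculate new values
--     width_augmentation_avancement = 0
--     width_augmentation_moment += 2
--     width_augmentation += 2
--     return (width_augmentation_avancement, width_augmentation_moment, width_augmentation)
--
-- def get_width_last_mini_floor(rank : int) -> int:  #calculate the width of the last mini floor of the pyramide with /\ for space
--     height_max_floor, width_mini_floor, width_augmentation, width_augmentation_moment, width_augmentation_avancement = 3, 3, 6, 3, 1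
--     for i in range(rank):
--         for j in range(height_max_floor-1):
--             width_mini_floor += 2
--         if i == rank-1:
--             return width_mini_floor
--         if width_augmentation_avancement == width_augmentation_moment:
--             width_augmentation_avancement, width_augmentation_moment, width_augmentation = get_new_augmentation_var_values(width_augmentation_avancement, width_augmentation_moment, width_augmentation)
--         width_mini_floor, height_max_floor, width_augmentation_avancement = (width_augmentation+ width_mini_floor, height_max_floor+1, width_augmentation_avancement+1)
--     return width_mini_floor
-- ===== SOURCE B (Python) =====
-- def get_width_last_mini_floor(rank: int) -> int:
--     # closed-form base + block-wise augmentation sum (O(sqrt(rank)) instead of O(rank^2))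
--     if rank <= 0:
--         return 3
--     base = 3 + 2 * (2 * rank + rank * (rank - 1) // 2)
--     remaining = rank - 1          # the last floor receives no augmentation
--     total = 0
--     aug = 6
--     block = 2                     # steps left before the augmentation grows
--     while remaining > 0:
--         take = min(block, remaining)
--         total += aug * take
--         remaining -= take
--         aug += 2
--         block = aug - 3           # reset period grows: 2, 5, 7, 9, ...
--     return base + total
-- ===== Notes on version B (the rewrite author's own statement) =====
-- stated objective: faster
-- what changed: Replaces A's nested per-floor simulation (inner width loop per floor plus per-floor augmentation bookkeeping) by a closed-form arithmetic base sum plus a loop that walks the augmentation reset schedule one block at a time.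
import Mathlib
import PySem

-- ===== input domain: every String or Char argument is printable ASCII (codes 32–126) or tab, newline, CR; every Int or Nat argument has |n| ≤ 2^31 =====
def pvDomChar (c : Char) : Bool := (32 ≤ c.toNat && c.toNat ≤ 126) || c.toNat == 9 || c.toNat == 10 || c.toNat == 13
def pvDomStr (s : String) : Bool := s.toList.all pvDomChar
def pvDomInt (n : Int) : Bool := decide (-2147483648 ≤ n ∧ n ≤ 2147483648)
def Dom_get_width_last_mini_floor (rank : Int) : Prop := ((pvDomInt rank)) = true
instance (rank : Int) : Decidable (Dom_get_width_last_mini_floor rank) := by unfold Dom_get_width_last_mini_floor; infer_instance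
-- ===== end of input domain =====

-- B replaces A's quadratic per-floor simulation by a closed-form base sum plus a block-wise
-- augmentation loop over the reset schedule (one iteration per reset period instead of per floor).


-- ===== PORT A =====
def get_new_augmentation_var_values (width_augmentation_avancement width_augmentation_moment width_augmentation : Int) : Int × Int × Int :=
  let width_augmentation_avancement := 0
  let width_augmentation_moment := width_augmentation_moment + 2
  let width_augmentation := width_augmentation + 2
  (width_augmentation_avancement, width_augmentation_moment, width_augmentation)

-- the for-loop over range(rank), with the early return at i == rank-1
def pvA_loop (is_ : List Int) (rank height_max_floor width_mini_floor width_augmentation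
    width_augmentation_moment width_augmentation_avancement : Int) : Int :=
  match is_ with
  | [] => width_mini_floor
  | i :: rest =>
    -- inner loop: for j in range(height_max_floor-1): width_mini_floor += 2
    let width_mini_floor :=
      (PySem.List.pyRange 0 (height_max_floor - 1) 1).foldl (fun w _ => w + 2) width_mini_floor
    if i = rank - 1 then width_mini_floor
    else
      let (width_augmentation_avancement, width_augmentation_moment, width_augmentation) :=
        if width_augmentation_avancement = width_augmentation_moment then
          get_new_augmentation_var_values width_augmentation_avancement width_augmentation_moment width_augmentation
        else (width_augmentation_avancement, width_augmentation_moment, width_augmentation)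
      pvA_loop rest rank (height_max_floor + 1) (width_augmentation + width_mini_floor)
        width_augmentation width_augmentation_moment (width_augmentation_avancement + 1)

def get_width_last_mini_floor (rank : Int) : Int :=
  pvA_loop (PySem.List.pyRange 0 rank 1) rank 3 3 6 3 1

-- ===== PORT B =====
-- the while-loop of Source B; fuel only makes it total (rank.toNat ≥ remaining iterations)
def pvB_loop : Nat → Int → Int → Int → Int → Int
  | 0, _, total, _, _ => total
  | fuel + 1, remaining, total, aug, block =>
    if remaining > 0 then
      let take := min block remaining
      pvB_loop fuel (remaining - take) (total + aug * take) (aug + 2) (aug + 2 - 3)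
    else total

def get_width_last_mini_floor_alt (rank : Int) : Int :=
  if rank ≤ 0 then 3
  else
    let base := 3 + 2 * (2 * rank + PySem.Int.floordiv (rank * (rank - 1)) 2)
    base + pvB_loop rank.toNat (rank - 1) 0 6 2

-- ===== PRECONDITION & SPEC =====
def Spec_get_width_last_mini_floor (rank : Int) (out : Int) : Prop := out = get_width_last_mini_floor_alt rank
instance (rank : Int) (out : Int) : Decidable (Spec_get_width_last_mini_floor rank out) := by unfold Spec_get_width_last_mini_floor; infer_instance

-- ===== CLAIM (what is proved, stated in full; the proofs are below) =====
def Claim_equal_get_width_last_mini_floor : Prop := ∀ (rank : Int), Dom_get_width_last_mini_floor rank → Spec_get_width_last_mini_floor rank (get_width_last_mini_floor rank)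

-- ===== LEMMAS AND PROOFS =====

-- per-step augmentation sum, the common mathematical core of both loops
def stepSum : Nat → Int → Int → Int → Int
  | 0, _, _, _ => 0
  | k + 1, aug, moment, av =>
    if av = moment then (aug + 2) + stepSum k (aug + 2) (moment + 2) 1
    else aug + stepSum k aug moment (av + 1)

-- sum of the widths added by the inner loops: floors of heights h, h+1, …
def baseSum : Nat → Int → Int
  | 0, _ => 0
  | k + 1, h => 2 * (h - 1) + baseSum k (h + 1)

theorem foldl_plus_two (l : List Int) (w : Int) :
    l.foldl (fun w _ => w + 2) w = w + 2 * l.length := by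
  induction l generalizing w with
  | nil => simp
  | cons a t ih => simp [List.foldl_cons, ih]; ring

theorem inner_fold (m w : Int) (hm : 0 ≤ m) :
    (PySem.List.pyRange 0 m 1).foldl (fun w _ => w + 2) w = w + 2 * m := by
  rw [foldl_plus_two, PySem.List.length_pyRange_one]
  omega

theorem A_loop_eq (k : Nat) : ∀ (rank h w aug moment av : Int), 1 ≤ h →
    pvA_loop (PySem.List.pyRange (rank - (k + 1)) rank 1) rank h w aug moment av
      = w + baseSum (k + 1) h + stepSum k aug moment av := by
  induction k with
  | zero =>
    intro rank h w aug moment av hh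
    have : PySem.List.pyRange (rank - 1) rank 1 = [rank - 1] := by
      have := PySem.List.pyRange_one_singleton (rank - 1)
      simpa using this
    rw [show ((0 : Nat) + 1 : Int) = 1 by norm_num] at *
    simp only [this, pvA_loop, inner_fold (h - 1) w (by omega)]
    simp [baseSum, stepSum]
  | succ k ih =>
    intro rank h w aug moment av hh
    have hcons : PySem.List.pyRange (rank - ((k : Int) + 1 + 1)) rank 1
        = (rank - ((k : Int) + 1 + 1)) :: PySem.List.pyRange (rank - ((k : Int) + 1 + 1) + 1) rank 1 :=
      PySem.List.pyRange_one_cons (by omega)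
    have hne : rank - ((k : Int) + 1 + 1) ≠ rank - 1 := by omega
    have hshift : rank - ((k : Int) + 1 + 1) + 1 = rank - ((k : Int) + 1) := by ring
    push_cast
    rw [hcons]
    simp only [pvA_loop, inner_fold (h - 1) w (by omega), hshift]
    by_cases hav : av = moment
    · rw [if_neg hne, if_pos hav]
      simp only [get_new_augmentation_var_values]
      rw [ih rank (h + 1) _ _ _ _ (by omega)]
      simp [baseSum, stepSum, hav]
      ring
    · rw [if_neg hne, if_neg hav]
      rw [ih rank (h + 1) _ _ _ _ (by omega)]
      simp [baseSum, stepSum, hav]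
      ring

theorem baseSum_eq (n : Nat) : ∀ h : Int, baseSum n h = 2 * n * (h - 1) + n * (n - 1) := by
  induction n with
  | zero => intro h; simp [baseSum]
  | succ n ih => intro h; rw [baseSum, ih (h + 1)]; push_cast; ring

theorem stepSum_const (k : Nat) : ∀ (aug m b : Int), (k : Int) ≤ b →
    stepSum k aug m (m - b) = aug * k := by
  induction k with
  | zero => intro aug m b _; simp [stepSum]
  | succ k ih =>
    intro aug m b hb
    have hne : m - b ≠ m := by push_cast at hb ⊢; omega
    rw [stepSum, if_neg hne]
    have : m - b + 1 = m - (b - 1) := by ring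
    rw [this, ih aug m (b - 1) (by push_cast at hb ⊢; omega)]
    push_cast; ring

theorem stepSum_reach (bn : Nat) : ∀ (k : Nat) (aug m : Int),
    stepSum (bn + k) aug m (m - bn) = aug * bn + stepSum k aug m m := by
  induction bn with
  | zero => intro k aug m; simp
  | succ bn ih =>
    intro k aug m
    have hne : m - ((bn : Int) + 1) ≠ m := by omega
    have h1 : (bn + 1) + k = (bn + k) + 1 := by omega
    rw [h1, stepSum]
    push_cast
    rw [if_neg hne, show m - ((bn : Int) + 1) + 1 = m - bn by ring]
    rw [ih k aug m]; ring

theorem bLoop_eq (fuel : Nat) : ∀ (k : Nat) (total aug b : Int), k ≤ fuel → 1 ≤ b → 6 ≤ aug →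
    pvB_loop fuel (k : Int) total aug b = total + stepSum k aug (aug - 3) (aug - 3 - b) := by
  induction fuel with
  | zero => intro k total aug b hk _ _; interval_cases k; simp [pvB_loop, stepSum]
  | succ fuel ih =>
    intro k total aug b hk hb haug
    match k with
    | 0 => simp [pvB_loop, stepSum]
    | k + 1 =>
      rw [pvB_loop]
      have hpos : ((k : Int) + 1) > 0 := by positivity
      push_cast
      rw [if_pos hpos]
      by_cases hle : ((k : Int) + 1) ≤ b
      · have hmin : min b ((k : Int) + 1) = (k : Int) + 1 := by omega
        rw [hmin, show (k : Int) + 1 - ((k : Int) + 1) = ((0 : Nat) : Int) by push_cast; ring]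
        rw [ih 0 _ _ _ (by omega) (by omega) (by omega)]
        have hc := stepSum_const (k + 1) aug (aug - 3) b (by push_cast; omega)
        push_cast at hc
        rw [hc]
        simp [stepSum]
      · -- b < k+1 : take = b, one full reset block
        have hmin : min b ((k : Int) + 1) = b := by omega
        set bn := b.toNat with hbn
        have hbcast : (bn : Int) = b := by omega
        have hk' : k + 1 - bn ≤ fuel := by omega
        obtain ⟨k2, hk2⟩ : ∃ k2, k + 1 - bn = k2 + 1 := ⟨k + 1 - bn - 1, by omega⟩
        rw [hmin, show (k : Int) + 1 - b = ((k + 1 - bn : Nat) : Int) by omega]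
        rw [ih (k + 1 - bn) _ _ _ hk' (by omega) (by omega), hk2]
        rw [show aug + 2 - 3 - (aug + 2 - 3) = (0 : Int) by ring,
            show aug + 2 - 3 = aug - 1 by ring]
        have hL : stepSum (k2 + 1) (aug + 2) (aug - 1) 0
            = (aug + 2) + stepSum k2 (aug + 2) (aug - 1) 1 := by
          simp only [stepSum]
          rw [if_neg (by omega : (0 : Int) ≠ aug - 1)]
          norm_num
        have hreach := stepSum_reach bn (k2 + 1) aug (aug - 3)
        rw [show bn + (k2 + 1) = k + 1 by omega, hbcast] at hreach
        rw [hreach]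
        have hR : stepSum (k2 + 1) aug (aug - 3) (aug - 3)
            = (aug + 2) + stepSum k2 (aug + 2) (aug - 1) 1 := by
          simp only [stepSum]
          rw [show aug - 3 + 2 = aug - 1 by ring]
          simp
        rw [hL, hR]
        ring

theorem get_width_last_mini_floor_spec : Claim_equal_get_width_last_mini_floor := by
  intro rank _
  unfold Spec_get_width_last_mini_floor get_width_last_mini_floor get_width_last_mini_floor_alt
  by_cases hr : rank ≤ 0
  · rw [if_pos hr, PySem.List.pyRange_one_eq_nil (by omega)]
    simp [pvA_loop]
  · rw [if_neg hr]
    push Not at hr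
    set n := rank.toNat with hn
    have hcast : (n : Int) = rank := by omega
    have hn1 : 1 ≤ n := by omega
    obtain ⟨m, hm⟩ : ∃ m, n = m + 1 := ⟨n - 1, by omega⟩
    -- A side
    have hA : pvA_loop (PySem.List.pyRange 0 rank 1) rank 3 3 6 3 1
        = 3 + baseSum (m + 1) 3 + stepSum m 6 3 1 := by
      have := A_loop_eq m rank 3 3 6 3 1 (by norm_num)
      rw [show rank - ((m : Int) + 1) = 0 by omega] at this
      exact this
    rw [hA]
    -- B side
    have hB : pvB_loop n (rank - 1) 0 6 2 = stepSum m 6 3 1 := by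
      have h1 : rank - 1 = ((m : Nat) : Int) := by omega
      rw [h1, hm, bLoop_eq (m + 1) m 0 6 2 (by omega) (by norm_num) (by norm_num)]
      norm_num
    rw [hB]
    -- base arithmetic
    have hev : (2 : Int) ∣ rank * (rank - 1) := by
      have := Int.even_mul_succ_self (rank - 1)
      rw [show rank - 1 + 1 = rank by ring] at this
      rcases this with ⟨c, hc⟩
      exact ⟨c, by linarith [hc]⟩
    have hfd : PySem.Int.floordiv (rank * (rank - 1)) 2 * 2 = rank * (rank - 1) := by
      rw [PySem.Int.floordiv_eq_ediv_of_pos (by norm_num)]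
      exact Int.ediv_mul_cancel hev
    rw [baseSum_eq]
    push_cast [hm] at hcast ⊢
    nlinarith [hfd]
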